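-- pv_equiv track=rewrite | github.com/ahadaso042/CPS109Labs | labs109.py | substitution_words
-- ===== SOURCE A (Python) =====
-- def substitution_words(pattern, words):
--     matching_words = []
--
--     for word in words:
--         if len(word) != len(pattern):
--             continue
--
--         mapping = {}
--         used_letters = set()
--
--         for i in range(len(word)):
--             pattern_char = pattern[i]
--             word_char = word[i]
--
--             if pattern_char in mapping:
--                 if mapping[pattern_char] != word_char:
--                     break
--             else:
--                 if word_char in used_letters:
--                     break
--                 mapping[pattern_char] = word_char
--                 used_letters.add(word_char)
--         else:
--             matching_words.append(word)
--
--     return matching_words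
-- ===== SOURCE B (Python) =====
-- def substitution_words(pattern, words):
--     def norm(s):
--         ids = {}
--         nxt = 0
--         sig = []
--         for ch in s:
--             if ch not in ids:
--                 ids[ch] = nxt
--                 nxt += 1
--             sig.append(ids[ch])
--         return sig
--
--     sig = norm(pattern)
--     n = len(pattern)
--     return [w for w in words if len(w) == n and norm(w) == sig]
-- ===== Notes on version B (the rewrite author's own statement) =====
-- stated objective: idiomatic
-- what changed: Replaces the per-word two-sided mapping/used-set simulation with a canonical first-occurrence signature: the pattern is normalized once and each word is kept iff its normalized signature equals the pattern's.
import Mathlib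
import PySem

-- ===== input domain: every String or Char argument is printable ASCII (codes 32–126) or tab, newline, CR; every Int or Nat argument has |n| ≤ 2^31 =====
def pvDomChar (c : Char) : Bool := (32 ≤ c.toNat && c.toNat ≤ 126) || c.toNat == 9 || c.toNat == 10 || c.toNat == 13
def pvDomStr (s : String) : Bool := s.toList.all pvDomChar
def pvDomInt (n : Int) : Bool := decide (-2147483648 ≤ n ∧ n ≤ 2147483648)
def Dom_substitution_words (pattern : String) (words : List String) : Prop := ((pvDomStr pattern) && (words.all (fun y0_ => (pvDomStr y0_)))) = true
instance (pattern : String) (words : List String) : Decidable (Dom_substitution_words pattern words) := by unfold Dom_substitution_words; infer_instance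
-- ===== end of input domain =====

-- B replaces A's two-sided mapping/used-set bijection check by comparing canonical
-- first-occurrence signatures (idiomatic; same asymptotic cost).

-- ===== PORT A =====
-- Inner loop of A: the loop runs over i in range(len(word)) with len(word) = len(pattern)
-- guaranteed by the guard, so pattern[i]/word[i] are always in range and iterating the
-- zip of the two character lists is exact.
def pvACheck (pairs : List (Char × Char)) (mapping : PySem.Dict Char Char) (used : PySem.Set Char) : Bool :=
  match pairs with
  | [] => true
  | (p, w) :: rest =>
    match mapping.get? p with
    | some w' => if w' = w then pvACheck rest mapping used else false
    | none =>
      if PySem.Set.contains used w then false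
      else pvACheck rest (mapping.insert p w) (PySem.Set.add used w)

def substitution_words (pattern : String) (words : List String) : List String :=
  words.foldl (fun acc word =>
    if word.toList.length ≠ pattern.toList.length then acc
    else if pvACheck (pattern.toList.zip word.toList) PySem.Dict.empty PySem.Set.empty
      then acc ++ [word] else acc) []

-- ===== PORT B =====
-- B's norm helper: first-occurrence id signature of a string.
def pvNorm (s : List Char) (ids : PySem.Dict Char Nat) (nxt : Nat) : List Nat :=
  match s with
  | [] => []
  | c :: rest =>
    match ids.get? c with
    | some i => i :: pvNorm rest ids nxt
    | none => nxt :: pvNorm rest (ids.insert c nxt) (nxt + 1)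

def substitution_words_alt (pattern : String) (words : List String) : List String :=
  let sig := pvNorm pattern.toList PySem.Dict.empty 0
  words.filter (fun w =>
    w.toList.length == pattern.toList.length &&
    pvNorm w.toList PySem.Dict.empty 0 == sig)

-- ===== PRECONDITION & SPEC =====
def Spec_substitution_words (pattern : String) (words : List String) (out : List String) : Prop := out = substitution_words_alt pattern words
instance (pattern : String) (words : List String) (out : List String) : Decidable (Spec_substitution_words pattern words out) := by unfold Spec_substitution_words; infer_instance

-- ===== CLAIM (what is proved, stated in full; the proofs are below) =====
def Claim_equal_substitution_words : Prop := ∀ (pattern : String) (words : List String), Dom_substitution_words pattern words → Spec_substitution_words pattern words (substitution_words pattern words)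

-- ===== LEMMAS AND PROOFS =====

-- Simulation invariant between A's state (mapping, used) and B's two normalizer states.
def pvInv (m : PySem.Dict Char Char) (u : PySem.Set Char)
    (dp dw : PySem.Dict Char Nat) (k : Nat) : Prop :=
  (∀ c v, m.get? c = some v → ∃ i, dp.get? c = some i ∧ dw.get? v = some i) ∧
  (∀ c i, dp.get? c = some i → ∃ v, m.get? c = some v) ∧
  (∀ v, PySem.Set.contains u v = (dw.get? v).isSome) ∧
  (∀ c i, dp.get? c = some i → i < k) ∧
  (∀ v i, dw.get? v = some i → i < k) ∧
  (∀ v v' i, dw.get? v = some i → dw.get? v' = some i → v = v')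

theorem contains_add_eq (u : PySem.Set Char) (w v : Char) :
    PySem.Set.contains (PySem.Set.add u w) v = (PySem.Set.contains u v || v == w) := by
  simp only [PySem.Set.contains, PySem.Set.add]
  split_ifs with h <;> by_cases hv : v = w <;> simp_all

theorem pvCheck_iff_norm (ps : List (Char × Char)) :
    ∀ (m : PySem.Dict Char Char) (u : PySem.Set Char) (dp dw : PySem.Dict Char Nat) (k : Nat),
    pvInv m u dp dw k →
    (pvACheck ps m u = true ↔
      pvNorm (ps.map Prod.fst) dp k = pvNorm (ps.map Prod.snd) dw k) := by
  induction ps with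
  | nil => intro m u dp dw k _; simp [pvACheck, pvNorm]
  | cons pw rest ih =>
    rintro m u dp dw k hInv
    obtain ⟨h1, h2, h3, h4, h5, h6⟩ := hInv
    obtain ⟨p, w⟩ := pw
    simp only [pvACheck, List.map_cons]
    cases hm : m.get? p with
    | some w0 =>
      obtain ⟨i, hdp, hdw0⟩ := h1 p w0 hm
      by_cases hww : w0 = w
      · subst hww
        simp only [pvNorm, hdp, hdw0, List.cons.injEq, true_and, if_true]
        exact ih m u dp dw k ⟨h1, h2, h3, h4, h5, h6⟩
      · cases hdw : dw.get? w with
        | some j =>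
          have hij : i ≠ j := by
            intro h
            exact hww (h6 w0 w i hdw0 (by rw [hdw, h]))
          simp [pvNorm, hdp, hdw, if_neg hww, List.cons.injEq, hij]
        | none =>
          have hik : i ≠ k := Nat.ne_of_lt (h4 p i hdp)
          simp [pvNorm, hdp, hdw, if_neg hww, List.cons.injEq, hik]
    | none =>
      have hdp : dp.get? p = none := by
        cases h : dp.get? p with
        | none => rfl
        | some i =>
          obtain ⟨v, hv⟩ := h2 p i h
          rw [hm] at hv; cases hv
      cases hu : PySem.Set.contains u w with
      | true =>
        have hsw : (dw.get? w).isSome = true := by rw [← h3]; exact hu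
        obtain ⟨j, hdw⟩ := Option.isSome_iff_exists.mp hsw
        have hkj : k ≠ j := Nat.ne_of_gt (h5 w j hdw)
        simp [pvNorm, hdp, hdw, List.cons.injEq, hkj]
      | false =>
        have hdw : dw.get? w = none := by
          have := h3 w; rw [hu] at this
          cases h : dw.get? w with
          | none => rfl
          | some j => rw [h] at this; simp at this
        simp only [pvNorm, hdp, hdw, List.cons.injEq, true_and]
        apply ih
        refine ⟨?_, ?_, ?_, ?_, ?_, ?_⟩
        · intro c v hc
          rw [PySem.Dict.get?_insert] at hc
          by_cases hcp : c = p
          · rw [if_pos hcp] at hc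
            cases hc
            exact ⟨k, by rw [hcp, PySem.Dict.get?_insert_self], by rw [PySem.Dict.get?_insert_self]⟩
          · rw [if_neg hcp] at hc
            obtain ⟨i, hdpi, hdwi⟩ := h1 c v hc
            have hvw : v ≠ w := by
              intro h; rw [h, hdw] at hdwi; cases hdwi
            exact ⟨i, by rw [PySem.Dict.get?_insert_of_ne _ _ hcp, hdpi],
                      by rw [PySem.Dict.get?_insert_of_ne _ _ hvw, hdwi]⟩
        · intro c i hc
          rw [PySem.Dict.get?_insert] at hc
          by_cases hcp : c = p
          · exact ⟨w, by rw [hcp, PySem.Dict.get?_insert_self]⟩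
          · rw [if_neg hcp] at hc
            obtain ⟨v, hv⟩ := h2 c i hc
            exact ⟨v, by rw [PySem.Dict.get?_insert_of_ne _ _ hcp, hv]⟩
        · intro v
          rw [contains_add_eq, PySem.Dict.get?_insert]
          by_cases hvw : v = w
          · simp [hvw]
          · have hb : (v == w) = false := by simp [hvw]
            rw [hb, Bool.or_false, if_neg hvw]
            exact h3 v
        · intro c i hc
          rw [PySem.Dict.get?_insert] at hc
          by_cases hcp : c = p
          · rw [if_pos hcp] at hc; cases hc; omega
          · rw [if_neg hcp] at hc; exact Nat.lt_succ_of_lt (h4 c i hc)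
        · intro v i hv
          rw [PySem.Dict.get?_insert] at hv
          by_cases hvw : v = w
          · rw [if_pos hvw] at hv; cases hv; omega
          · rw [if_neg hvw] at hv; exact Nat.lt_succ_of_lt (h5 v i hv)
        · intro v v' i hv hv'
          rw [PySem.Dict.get?_insert] at hv hv'
          by_cases hvw : v = w <;> by_cases hvw' : v' = w
          · rw [hvw, hvw']
          · rw [if_pos hvw] at hv; cases hv
            rw [if_neg hvw'] at hv'
            exact absurd (h5 v' k hv') (by omega)
          · rw [if_pos hvw'] at hv'; cases hv'
            rw [if_neg hvw] at hv
            exact absurd (h5 v k hv) (by omega)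
          · rw [if_neg hvw] at hv; rw [if_neg hvw'] at hv'
            exact h6 v v' i hv hv'

theorem pvInv_init : pvInv PySem.Dict.empty PySem.Set.empty PySem.Dict.empty PySem.Dict.empty 0 := by
  refine ⟨?_, ?_, ?_, ?_, ?_, ?_⟩ <;>
    simp [PySem.Dict.get?_empty, PySem.Set.contains, PySem.Set.empty]

-- Per-word characterisation: A's accept condition equals B's filter predicate.
theorem pvWord_iff (pattern word : String) :
    ((!decide (word.toList.length ≠ pattern.toList.length)) &&
      pvACheck (pattern.toList.zip word.toList) PySem.Dict.empty PySem.Set.empty) =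
    ((word.toList.length == pattern.toList.length) &&
      (pvNorm word.toList PySem.Dict.empty 0 == pvNorm pattern.toList PySem.Dict.empty 0)) := by
  by_cases hlen : word.toList.length = pattern.toList.length
  · have hfst : (pattern.toList.zip word.toList).map Prod.fst = pattern.toList :=
      List.map_fst_zip (le_of_eq hlen.symm)
    have hsnd : (pattern.toList.zip word.toList).map Prod.snd = word.toList :=
      List.map_snd_zip (le_of_eq hlen)
    have := pvCheck_iff_norm (pattern.toList.zip word.toList)
      PySem.Dict.empty PySem.Set.empty PySem.Dict.empty PySem.Dict.empty 0 pvInv_init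
    rw [hfst, hsnd] at this
    simp only [hlen, ne_eq, not_true_eq_false, decide_false, Bool.not_false, Bool.true_and,
      beq_self_eq_true, Bool.true_and]
    cases hA : pvACheck (pattern.toList.zip word.toList) PySem.Dict.empty PySem.Set.empty
    · have : ¬ (pvNorm pattern.toList PySem.Dict.empty 0 = pvNorm word.toList PySem.Dict.empty 0) := by
        rw [← this, hA]; simp
      simp
      exact fun h => this h.symm
    · have h2 := this.mp hA
      simp [h2.symm]
  · have hlen' : ¬ word.length = pattern.length := by simpa using hlen
    simp [hlen']

-- ===== VERDICT (by name: the statement is the Claim_ definition above) =====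
theorem substitution_words_spec : Claim_equal_substitution_words := by
  intro pattern words _
  unfold Spec_substitution_words substitution_words substitution_words_alt
  have hfun : (fun (acc : List String) (word : String) =>
      if word.toList.length ≠ pattern.toList.length then acc
      else if pvACheck (pattern.toList.zip word.toList) PySem.Dict.empty PySem.Set.empty
        then acc ++ [word] else acc) =
      (fun acc word =>
        if ((word.toList.length == pattern.toList.length) &&
            (pvNorm word.toList PySem.Dict.empty 0 == pvNorm pattern.toList PySem.Dict.empty 0)) = true
        then acc ++ [word] else acc) := by
    funext acc word
    rw [← pvWord_iff pattern word]
    by_cases hlen : word.toList.length = pattern.toList.length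
    · have hlen' : word.length = pattern.length := by simpa using hlen
      cases hA : pvACheck (pattern.toList.zip word.toList) PySem.Dict.empty PySem.Set.empty <;>
        simp [hlen]
    · have hlen' : ¬ word.length = pattern.length := by simpa using hlen
      simp [hlen']
  rw [hfun, PySem.List.foldl_append_if_eq_filter]
  simp
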